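-- pv_equiv track=rewrite | github.com/louiscarteron/dna_modelling | modelling_script/process_fastq.py | find_smallest_sum
-- ===== SOURCE A (Python) =====
-- def find_smallest_sum(arr):
--   size = 3
--   idx = 0
--   min_sum = 1000
--   for i in range(len(arr)-size + 1):
--     curr_sum = sum(arr[i:i+size])
--     if curr_sum < min_sum:
--       min_sum = curr_sum
--       idx = i
--   return idx
-- ===== SOURCE B (Python) =====
-- def find_smallest_sum(arr):
--     prefix = [0]
--     run = 0
--     for x in arr:
--         run += x
--         prefix.append(run)
--     idx = 0
--     min_sum = 1000
--     for i in range(len(arr) - 2):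
--         s = prefix[i + 3] - prefix[i]
--         if s < min_sum:
--             min_sum = s
--             idx = i
--     return idx
-- ===== Notes on version B (the rewrite author's own statement) =====
-- stated objective: faster
-- what changed: Replaces the per-window slice-and-resum with a one-pass prefix-sum array, so each window sum is a single subtraction P[i+3]-P[i] instead of building and summing a 3-element slice.
import Mathlib
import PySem

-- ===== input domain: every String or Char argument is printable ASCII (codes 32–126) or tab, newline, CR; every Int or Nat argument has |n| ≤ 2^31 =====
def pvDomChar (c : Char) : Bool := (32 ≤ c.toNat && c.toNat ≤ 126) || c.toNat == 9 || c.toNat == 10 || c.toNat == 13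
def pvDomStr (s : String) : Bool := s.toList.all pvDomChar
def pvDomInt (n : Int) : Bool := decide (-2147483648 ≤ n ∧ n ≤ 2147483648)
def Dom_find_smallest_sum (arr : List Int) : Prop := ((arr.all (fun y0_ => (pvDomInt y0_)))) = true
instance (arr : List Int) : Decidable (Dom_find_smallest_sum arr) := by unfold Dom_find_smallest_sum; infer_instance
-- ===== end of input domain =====

-- B replaces the per-window slice-and-resum with a prefix-sum array (window sum = P[i+3]-P[i]); objective: faster (constant factor).

-- ===== PORT A =====
def find_smallest_sum (arr : List Int) : Int :=
  let size : Int := 3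
  let st := (PySem.List.pyRange 0 ((arr.length : Int) - size + 1) 1).foldl
    (fun (st : Int × Int) i =>
      let curr_sum := (PySem.List.slice arr (some i) (some (i + size))).sum
      if curr_sum < st.2 then (i, curr_sum) else st) (0, 1000)
  st.1

-- ===== PORT B =====
def find_smallest_sum_alt (arr : List Int) : Int :=
  let pr := arr.foldl (fun (st : List Int × Int) x =>
      let r := st.2 + x
      (st.1 ++ [r], r)) ([0], 0)
  let pfx := pr.1
  -- prefix indices i and i+3 are always in range (0 ≤ i < len-2), so Python indexing never raises
  let st := (PySem.List.pyRange 0 ((arr.length : Int) - 2) 1).foldl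
    (fun (st : Int × Int) i =>
      let s := PySem.List.pyGetD pfx (i + 3) 0 - PySem.List.pyGetD pfx i 0
      if s < st.2 then (i, s) else st) (0, 1000)
  st.1

-- ===== PRECONDITION & SPEC =====
def Spec_find_smallest_sum (arr : List Int) (out : Int) : Prop := out = find_smallest_sum_alt arr
instance (arr : List Int) (out : Int) : Decidable (Spec_find_smallest_sum arr out) := by unfold Spec_find_smallest_sum; infer_instance

-- ===== CLAIM (what is proved, stated in full; the proofs are below) =====
def Claim_equal_find_smallest_sum : Prop := ∀ (arr : List Int), Dom_find_smallest_sum arr → Spec_find_smallest_sum arr (find_smallest_sum arr)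

-- ===== LEMMAS AND PROOFS =====

-- the prefix-building fold produces exactly the running sums
theorem pv_pref_fold (arr : List Int) : ∀ (acc : List Int) (r : Int),
    (arr.foldl (fun (st : List Int × Int) x => (st.1 ++ [st.2 + x], st.2 + x)) (acc, r))
      = (acc ++ (List.range arr.length).map (fun k => r + (arr.take (k+1)).sum), r + arr.sum) := by
  induction arr with
  | nil => simp
  | cons x tl ih =>
    intro acc r
    simp only [List.foldl_cons]
    rw [ih]
    rw [List.length_cons, List.range_succ_eq_map, List.map_cons, List.map_map]
    simp [Function.comp_def, add_assoc, List.take_succ_cons]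

-- entry k of the prefix list is the sum of the first k elements
theorem pv_prefix_getD (arr : List Int) (k : Nat) (hk : k ≤ arr.length) :
    (([0] ++ (List.range arr.length).map (fun j => 0 + (arr.take (j+1)).sum)).getD k 0 : Int)
      = (arr.take k).sum := by
  cases k with
  | zero => simp
  | succ j =>
    have hj : j < arr.length := by omega
    simp [List.getD, hj]

theorem find_smallest_sum_equal (arr : List Int) :
    find_smallest_sum arr = find_smallest_sum_alt arr := by
  unfold find_smallest_sum find_smallest_sum_alt
  rw [pv_pref_fold arr [0] 0]
  simp only []
  have hrange : (arr.length : Int) - 3 + 1 = (arr.length : Int) - 2 := by ring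
  rw [hrange]
  congr 1
  apply PySem.List.foldl_congr_mem
  intro st i hi
  have hmem := (PySem.List.mem_pyRange_one).mp hi
  obtain ⟨h0, h2⟩ := hmem
  have hlen : ([0] ++ (List.range arr.length).map (fun j => 0 + (arr.take (j+1)).sum)).length
      = arr.length + 1 := by simp
  have hi3 : (i + 3).toNat = i.toNat + 3 := by omega
  have hv : PySem.List.pyGetD ([0] ++ (List.range arr.length).map (fun k => 0 + (arr.take (k+1)).sum)) (i + 3) 0
        - PySem.List.pyGetD ([0] ++ (List.range arr.length).map (fun k => 0 + (arr.take (k+1)).sum)) i 0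
      = (PySem.List.slice arr (some i) (some (i + 3))).sum := by
    rw [PySem.List.pyGetD_eq_getElem _ _ (by omega) (by rw [hlen]; omega),
        PySem.List.pyGetD_eq_getElem _ _ (by omega) (by rw [hlen]; omega)]
    rw [← List.getD_eq_getElem _ 0, ← List.getD_eq_getElem _ 0]
    rw [pv_prefix_getD arr _ (by omega), pv_prefix_getD arr _ (by omega)]
    rw [PySem.List.slice_toNat arr (by omega) (by omega)]
    have h3 : (i + 3).toNat - i.toNat = 3 := by omega
    rw [h3, hi3]
    have htake : arr.take (i.toNat + 3) = arr.take i.toNat ++ (arr.drop i.toNat).take 3 :=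
      List.take_add
    rw [htake, List.sum_append]
    ring
  rw [hv]

-- ===== VERDICT (by name: the statement is the Claim_ definition above) =====
theorem find_smallest_sum_spec : Claim_equal_find_smallest_sum := by
  intro arr _
  unfold Spec_find_smallest_sum
  exact find_smallest_sum_equal arr
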